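-- pv_equiv track=rewrite | github.com/Jangchaeyun/programmers_py | 모든 문제/Day41/Star sequence.py | solution
-- ===== SOURCE A (Python) =====
-- from collections import Counter
--
-- def solution(a):
--     answer = -1
--
--     els = Counter(a)
--
--     for k in els.keys():
--         if els[k] <= answer:
--             continue
--         cnt = 0
--         idx = 0
--         while idx < len(a) - 1:
--             if (a[idx] != k and a[idx + 1] != k) or (a[idx] == a[idx + 1]):
--                 idx += 1
--                 continue
--
--             cnt += 1
--             idx += 2
--
--         answer = max(cnt, answer)
--
--     return -1 if answer == -1 else answer * 2
-- ===== SOURCE B (Python) =====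
-- def solution(a):
--     if not a:
--         return -1
--     n = len(a)
--     pos = {}
--     for i, x in enumerate(a):
--         pos.setdefault(x, []).append(i)
--     best = 0
--     for k, ps in pos.items():
--         if len(ps) <= best:
--             continue
--         cnt = 0
--         last = -1  # last index already consumed by a pair
--         for p in ps:
--             if p <= last:
--                 continue
--             if p - 1 > last and a[p - 1] != k:
--                 cnt += 1
--                 last = p
--             elif p + 1 < n and a[p + 1] != k:
--                 cnt += 1
--                 last = p + 1
--         best = max(best, cnt)
--     return best * 2
-- ===== Notes on version B (the rewrite author's own statement) =====
-- stated objective: faster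
-- what changed: Instead of rescanning the whole array once per distinct value, B groups occurrence positions per value in one pass and runs the greedy pairing over only that value's positions, so total work is linear.
import Mathlib
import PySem

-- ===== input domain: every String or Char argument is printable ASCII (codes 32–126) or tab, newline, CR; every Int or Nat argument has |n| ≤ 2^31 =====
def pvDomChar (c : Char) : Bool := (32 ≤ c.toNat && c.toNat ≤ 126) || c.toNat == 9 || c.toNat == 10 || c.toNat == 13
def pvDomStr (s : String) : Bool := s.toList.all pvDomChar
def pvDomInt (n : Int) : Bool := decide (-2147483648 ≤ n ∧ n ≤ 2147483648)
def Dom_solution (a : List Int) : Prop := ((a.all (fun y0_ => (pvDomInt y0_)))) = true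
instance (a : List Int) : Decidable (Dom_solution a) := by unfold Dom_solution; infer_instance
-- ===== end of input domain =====

-- B replaces A's full-array rescan per distinct value with one grouping pass and a
-- per-value greedy over that value's occurrence positions (objective: faster).

-- ===== PORT A =====
-- a[i]; every index the two ports read is in range, so the default 0 is never used
def pvGet (a : List Int) (i : Int) : Int := PySem.List.pyGetD a i 0

-- the inner 'while idx < len(a) - 1' loop of A, for key k
def pvScan (k : Int) (a : List Int) (idx cnt : Int) : Int :=
  if _h : idx < (a.length : Int) - 1 then
    if (pvGet a idx ≠ k ∧ pvGet a (idx + 1) ≠ k) ∨ pvGet a idx = pvGet a (idx + 1) then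
      pvScan k a (idx + 1) cnt
    else
      pvScan k a (idx + 2) (cnt + 1)
  else cnt
termination_by ((a.length : Int) - idx).toNat
decreasing_by all_goals omega

def solution (a : List Int) : Int :=
  let els := PySem.Dict.counter a
  let answer := els.keys.foldl (fun answer k =>
    if els.getD k 0 ≤ answer then answer
    else max (pvScan k a 0 0) answer) (-1)
  if answer = -1 then -1 else answer * 2

-- ===== PORT B =====
-- the 'for p in ps' loop of B, for key k
def pvGreedy (k : Int) (a : List Int) (ps : List Int) (last cnt : Int) : Int :=
  match ps with
  | [] => cnt
  | p :: rest =>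
    if p ≤ last then pvGreedy k a rest last cnt
    else if p - 1 > last ∧ pvGet a (p - 1) ≠ k then pvGreedy k a rest p (cnt + 1)
    else if p + 1 < (a.length : Int) ∧ pvGet a (p + 1) ≠ k then pvGreedy k a rest (p + 1) (cnt + 1)
    else pvGreedy k a rest last cnt

-- the grouping pass: pos.setdefault(x, []).append(i) over enumerate(a)
def pvPos (a : List Int) : PySem.Dict Int (List Int) :=
  (PySem.List.enumerate a).foldl (fun d p => d.modify p.2 [] (· ++ [p.1])) PySem.Dict.empty

def solution_alt (a : List Int) : Int :=
  if a = [] then -1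
  else
    let pos := pvPos a
    let best := pos.items.foldl (fun best kps =>
      if (kps.2.length : Int) ≤ best then best
      else max best (pvGreedy kps.1 a kps.2 (-1) 0)) 0
    best * 2

-- ===== PRECONDITION & SPEC =====
def Spec_solution (a : List Int) (out : Int) : Prop := out = solution_alt a
instance (a : List Int) (out : Int) : Decidable (Spec_solution a out) := by unfold Spec_solution; infer_instance

-- ===== CLAIM (what is proved, stated in full; the proofs are below) =====
def Claim_equal_solution : Prop := ∀ (a : List Int), Dom_solution a → Spec_solution a (solution a)

-- ===== LEMMAS AND PROOFS =====

-- the list of positions (as Ints) of k in a, in increasing order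
def posL (k : Int) (a : List Int) : List Int :=
  (((PySem.List.enumerate a).filter (fun p => p.2 == k)).map (·.1))

theorem posL_mem (k : Int) (a : List Int) (j : Int) :
    j ∈ posL k a ↔ 0 ≤ j ∧ j < (a.length : Int) ∧ pvGet a j = k := by
  simp only [posL, List.mem_map, List.mem_filter, PySem.List.mem_enumerate_iff]
  constructor
  · rintro ⟨p, ⟨⟨m, hm, rfl⟩, hk⟩, rfl⟩
    simp only [beq_iff_eq] at hk ⊢
    refine ⟨by omega, by omega, ?_⟩
    rw [pvGet, PySem.List.pyGetD_eq_getElem a 0 (by omega) (by omega)]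
    simpa using hk
  · rintro ⟨h0, hn, hk⟩
    rw [pvGet, PySem.List.pyGetD_eq_getElem a 0 h0 hn] at hk
    refine ⟨(j, a[j.toNat]'(by omega)), ⟨⟨j.toNat, by omega, by simp; omega⟩, by simpa using hk⟩, rfl⟩

theorem posL_sorted (k : Int) (a : List Int) : (posL k a).Pairwise (· < ·) := by
  apply List.Pairwise.map
  · exact fun p q h => h
  · exact (PySem.List.pairwise_lt_enumerate a 0).filter _

theorem posL_length (k : Int) (a : List Int) : (posL k a).length = a.count k := by
  rw [posL, List.length_map, ← List.countP_eq_length_filter]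
  conv_rhs => rw [← PySem.List.map_snd_enumerate a 0]
  rw [List.count, List.countP_map]
  rfl

-- A's scan returns cnt when no k occurs at or after idx
theorem scan_none (k : Int) (a : List Int) (idx cnt : Int)
    (h : ∀ j : Int, idx ≤ j → j < (a.length : Int) → pvGet a j ≠ k) :
    pvScan k a idx cnt = cnt := by
  rw [pvScan]
  split
  · rename_i hlt
    rw [if_pos (Or.inl ⟨h idx le_rfl (by omega), h (idx+1) (by omega) (by omega)⟩)]
    exact scan_none k a (idx+1) cnt (fun j hj hj' => h j (by omega) hj')
  · rfl
termination_by ((a.length : Int) - idx).toNat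
decreasing_by omega

-- A's scan walks over a k-free stretch without pairing
theorem scan_walk (k : Int) (a : List Int) (p : Int) (hp : p < (a.length : Int)) :
    ∀ (m : Nat) (idx cnt : Int), idx + m = p - 1 →
    (∀ j : Int, idx ≤ j → j < p → pvGet a j ≠ k) →
    pvScan k a idx cnt = pvScan k a (p - 1) cnt := by
  intro m
  induction m with
  | zero => intro idx cnt he _; rw [show idx = p - 1 by omega]
  | succ m ih =>
    intro idx cnt he hfree
    rw [pvScan, dif_pos (by omega),
      if_pos (Or.inl ⟨hfree idx le_rfl (by omega), hfree (idx+1) (by omega) (by omega)⟩)]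
    exact ih (idx+1) cnt (by omega) (fun j hj hj' => hfree j (by omega) hj')

-- main simulation: A's scan = B's per-key greedy over the remaining positions
theorem scan_eq_greedy (k : Int) (a : List Int) :
    ∀ (ps : List Int) (idx last cnt : Int),
    last < idx →
    (∀ j : Int, j ∈ ps ↔ idx ≤ j ∧ j < (a.length : Int) ∧ pvGet a j = k) →
    ps.Pairwise (· < ·) →
    (last < idx - 1 → idx < (a.length : Int) ∧ pvGet a (idx - 1) = k ∧ pvGet a idx = k) →
    pvScan k a idx cnt = pvGreedy k a ps last cnt := by
  intro ps
  induction ps with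
  | nil =>
    intro idx last cnt _ hmem _ _
    rw [pvGreedy]
    exact scan_none k a idx cnt (fun j hj hj' hk => by
      exact absurd ((hmem j).mpr ⟨hj, hj', hk⟩) (List.not_mem_nil))
  | cons p rest ih =>
    intro idx last cnt hlast hmem hpw hgap
    obtain ⟨hip, hpn, hpk⟩ := (hmem p).mp List.mem_cons_self
    have hrest_gt : ∀ j ∈ rest, p < j := fun j hj => (List.pairwise_cons.mp hpw).1 j hj
    rw [pvGreedy, if_neg (by omega)]
    rcases lt_or_eq_of_le hip with hlt | heq
    · -- idx < p : walk to p - 1, pair there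
      have hfree : ∀ j : Int, idx ≤ j → j < p → pvGet a j ≠ k := by
        intro j hj hj' hk
        have hj2 : j ∈ p :: rest := (hmem j).mpr ⟨hj, by omega, hk⟩
        rcases List.mem_cons.mp hj2 with rfl | hj3
        · omega
        · exact absurd (hrest_gt j hj3) (by omega)
      rw [scan_walk k a p hpn (p - 1 - idx).toNat idx cnt (by omega) hfree]
      rw [pvScan, dif_pos (by omega)]
      have hpm1 : pvGet a (p - 1) ≠ k := hfree (p-1) (by omega) (by omega)
      have hcond : ¬((pvGet a (p-1) ≠ k ∧ pvGet a (p - 1 + 1) ≠ k) ∨ pvGet a (p-1) = pvGet a (p - 1 + 1)) := by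
        rw [show p - 1 + 1 = p by omega, hpk]
        push_neg
        exact ⟨fun _ => rfl, hpm1⟩
      rw [if_neg hcond, if_pos ⟨by omega, hpm1⟩, show p - 1 + 2 = p + 1 by omega]
      apply ih (p+1) p (cnt+1) (by omega)
      · intro j
        constructor
        · intro hj
          obtain ⟨h1, h2, h3⟩ := (hmem j).mp (List.mem_cons_of_mem p hj)
          exact ⟨by have := hrest_gt j hj; omega, h2, h3⟩
        · rintro ⟨h1, h2, h3⟩
          have : j ∈ p :: rest := (hmem j).mpr ⟨by omega, h2, h3⟩
          rcases List.mem_cons.mp this with rfl | hj3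
          · omega
          · exact hj3
      · exact (List.pairwise_cons.mp hpw).2
      · omega
    · -- idx = p
      subst heq
      rw [if_neg (by rintro ⟨h1, h2⟩; exact h2 (hgap (by omega)).2.1)]
      by_cases hR : idx + 1 < (a.length : Int) ∧ pvGet a (idx + 1) ≠ k
      · rw [if_pos hR]
        rw [pvScan, dif_pos (by omega),
          if_neg (by push_neg; exact ⟨fun h => absurd hpk h, by rw [hpk]; exact fun h => hR.2 h.symm⟩)]
        apply ih (idx+2) (idx+1) (cnt+1) (by omega)
        · intro j
          constructor
          · intro hj
            obtain ⟨h1, h2, h3⟩ := (hmem j).mp (List.mem_cons_of_mem idx hj)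
            have := hrest_gt j hj
            have hne : j ≠ idx + 1 := fun he => hR.2 (he ▸ h3)
            exact ⟨by omega, h2, h3⟩
          · rintro ⟨h1, h2, h3⟩
            have : j ∈ idx :: rest := (hmem j).mpr ⟨by omega, h2, h3⟩
            rcases List.mem_cons.mp this with rfl | hj3
            · omega
            · exact hj3
        · exact (List.pairwise_cons.mp hpw).2
        · omega
      · rw [if_neg hR]
        push_neg at hR
        by_cases hn : idx + 1 < (a.length : Int)
        · -- a[idx+1] = k : skip one step
          have hk1 : pvGet a (idx + 1) = k := hR hn
          rw [pvScan, dif_pos (by omega), if_pos (Or.inr (by rw [hpk, hk1]))]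
          apply ih (idx+1) last cnt (by omega)
          · intro j
            constructor
            · intro hj
              obtain ⟨h1, h2, h3⟩ := (hmem j).mp (List.mem_cons_of_mem idx hj)
              exact ⟨by have := hrest_gt j hj; omega, h2, h3⟩
            · rintro ⟨h1, h2, h3⟩
              have : j ∈ idx :: rest := (hmem j).mpr ⟨by omega, h2, h3⟩
              rcases List.mem_cons.mp this with rfl | hj3
              · omega
              · exact hj3
          · exact (List.pairwise_cons.mp hpw).2
          · intro _
            exact ⟨hn, by rw [show idx + 1 - 1 = idx by omega]; exact hpk, hk1⟩
        · -- idx is the last index of a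
          have hrest : rest = [] := by
            rw [List.eq_nil_iff_forall_not_mem]
            intro j hj
            have := hrest_gt j hj
            have := ((hmem j).mp (List.mem_cons_of_mem idx hj)).2.1
            omega
          rw [hrest, pvGreedy, pvScan, dif_neg (by omega)]

theorem per_key (k : Int) (a : List Int) :
    pvScan k a 0 0 = pvGreedy k a (posL k a) (-1) 0 :=
  scan_eq_greedy k a (posL k a) 0 (-1) 0 (by omega)
    (fun j => by simpa using posL_mem k a j) (posL_sorted k a) (by omega)

theorem greedy_ge (k : Int) (a : List Int) :
    ∀ (ps : List Int) (last cnt : Int), cnt ≤ pvGreedy k a ps last cnt := by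
  intro ps
  induction ps with
  | nil => intro last cnt; rw [pvGreedy]
  | cons p rest ih =>
    intro last cnt
    rw [pvGreedy]
    split_ifs
    · exact ih last cnt
    · exact le_trans (by omega) (ih p (cnt+1))
    · exact le_trans (by omega) (ih (p+1) (cnt+1))
    · exact ih last cnt

theorem scan_nonneg (k : Int) (a : List Int) : 0 ≤ pvScan k a 0 0 := by
  rw [per_key]; exact greedy_ge k a _ _ _

theorem pos_keys (a : List Int) : (pvPos a).keys = PySem.Set.ofList a := by
  rw [pvPos, PySem.Dict.keys_foldl_modify_key (PySem.List.enumerate a) (fun p => p.2) []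
      (fun _ p => (· ++ [p.1])), PySem.Dict.keys_empty, PySem.Set.update_nil_left,
      PySem.List.map_snd_enumerate]

theorem pos_nodup (a : List Int) : (pvPos a).keys.Nodup := by
  rw [pvPos]
  exact PySem.Dict.nodup_keys_foldl_modify_key (PySem.List.enumerate a) (fun p => p.2) []
    (fun _ p => (· ++ [p.1])) PySem.Dict.empty (by simp [PySem.Dict.keys_empty])

theorem pos_getD (a : List Int) (k : Int) : (pvPos a).getD k [] = posL k a := by
  have h1 : pvPos a = ((PySem.List.enumerate a).map Prod.swap).foldl
      (fun d q => d.modify q.1 [] (· ++ [q.2])) PySem.Dict.empty := by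
    rw [pvPos, List.foldl_map]; rfl
  rw [h1, PySem.Dict.getD_foldl_modify_append, PySem.Dict.getD_empty, List.nil_append,
      List.filter_map, List.map_map, posL]
  rfl

theorem items_eq_keys_map {κ ν : Type} [BEq κ] [LawfulBEq κ] (d : PySem.Dict κ ν) (d0 : ν)
    (h : d.keys.Nodup) : d.items = d.keys.map (fun k => (k, d.getD k d0)) := by
  simp only [PySem.Dict.keys, List.map_map]
  conv_lhs => rw [← List.map_id d.items]
  apply List.map_congr_left
  rintro ⟨k, v⟩ hp
  simp only [id, Function.comp]
  rw [PySem.Dict.getD_of_mem_items d hp h d0]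

-- the per-key step functions of the two folds, after both are rewritten to List.count
def gA (a : List Int) : Int → Int → Int := fun answer k =>
  if (List.count k a : Int) ≤ answer then answer else max (pvScan k a 0 0) answer
def gB (a : List Int) : Int → Int → Int := fun best k =>
  if (List.count k a : Int) ≤ best then best else max best (pvScan k a 0 0)

theorem fold_tail (a : List Int) (ks : List Int) (v : Int) :
    List.foldl (gA a) v ks = List.foldl (gB a) v ks := by
  apply PySem.List.foldl_congr_mem
  intro acc x _
  rw [gA, gB]
  split_ifs
  · rfl
  · exact max_comm _ _

theorem fold_nonneg (a : List Int) : ∀ (ks : List Int) (v : Int), 0 ≤ v → 0 ≤ List.foldl (gB a) v ks := by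
  intro ks
  induction ks with
  | nil => intro v hv; simpa
  | cons k ks ih =>
    intro v hv
    rw [List.foldl_cons, gB]
    split_ifs
    · exact ih v hv
    · exact ih _ (le_trans hv (le_max_left _ _))

theorem fold_main (a : List Int) (k0 : Int) (ks : List Int) (h1 : 0 < List.count k0 a) :
    List.foldl (gA a) (-1) (k0 :: ks) = List.foldl (gB a) 0 (k0 :: ks) := by
  rw [List.foldl_cons, List.foldl_cons]
  rw [show gA a (-1) k0 = pvScan k0 a 0 0 by
        rw [gA]
        simp only [if_neg (show ¬((List.count k0 a : Int) ≤ -1) by omega)]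
        exact max_eq_left (le_trans (by omega) (scan_nonneg k0 a))]
  rw [show gB a 0 k0 = pvScan k0 a 0 0 by
        rw [gB]
        simp only [if_neg (show ¬((List.count k0 a : Int) ≤ 0) by omega)]
        exact max_eq_right (scan_nonneg k0 a)]
  exact fold_tail a ks _

-- ===== VERDICT (by name: the statement is the Claim_ definition above) =====
theorem solution_spec : Claim_equal_solution := by
  unfold Claim_equal_solution
  intro a _
  unfold Spec_solution
  cases a with
  | nil => rfl
  | cons x t =>
    obtain ⟨k0, ks, hE⟩ : ∃ k0 ks, PySem.Set.ofList (x :: t) = k0 :: ks := by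
      cases h : PySem.Set.ofList (x :: t) with
      | nil =>
        exact absurd ((PySem.Set.mem_ofList (x :: t) x).mpr List.mem_cons_self)
          (by rw [h]; exact List.not_mem_nil)
      | cons k0 ks => exact ⟨k0, ks, rfl⟩
    have hcnt : 0 < List.count k0 (x :: t) :=
      List.count_pos_iff.mpr ((PySem.Set.mem_ofList (x :: t) k0).mp (hE ▸ List.mem_cons_self))
    have hA : solution (x :: t) =
        (if List.foldl (gA (x :: t)) (-1) (PySem.Set.ofList (x :: t)) = -1 then -1
         else List.foldl (gA (x :: t)) (-1) (PySem.Set.ofList (x :: t)) * 2) := by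
      simp only [solution, PySem.Dict.keys_counter, PySem.Dict.getD_counter]
      rfl
    have hB : solution_alt (x :: t) =
        (List.foldl (gB (x :: t)) 0 (PySem.Set.ofList (x :: t))) * 2 := by
      rw [solution_alt, if_neg (by simp)]
      show List.foldl (fun best kps => if ((kps.2.length : Int)) ≤ best then best
        else max best (pvGreedy kps.1 (x :: t) kps.2 (-1) 0)) 0 (pvPos (x :: t)).items * 2 = _
      rw [items_eq_keys_map (pvPos (x :: t)) [] (pos_nodup (x :: t)), pos_keys]
      simp only [pos_getD, List.foldl_map]
      simp only [posL_length, ← per_key]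
      rfl
    rw [hA, hB, hE, fold_main (x :: t) k0 ks hcnt,
      if_neg (by have := fold_nonneg (x :: t) (k0 :: ks) 0 le_rfl; omega)]
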